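-- pv_equiv track=rewrite | github.com/HeathenUK/8bit-cpu | MK1_CPU/code/hw_regression.py | _ts_for_sequence
-- ===== SOURCE A (Python) =====
-- def _ts_for_sequence(vals, ts, expected):
--     """Return list of ts corresponding to the first occurrence of `expected`
--     as a contiguous subsequence within (vals, ts). None if not found."""
--     n, m = len(vals), len(expected)
--     if m == 0:
--         return []
--     for i in range(n - m + 1):
--         if vals[i:i+m] == list(expected):
--             return ts[i:i+m]
--     return None
-- ===== SOURCE B (Python) =====
-- def _rk_find(vals, expected):
--     """Index of the first occurrence of `expected` as a contiguous run in
--     `vals`, via a Rabin-Karp scan: each window of pattern length is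
--     summarised by a rolling base-B fingerprint modulo a Mersenne prime,
--     updated in O(1) per shift; elements are compared one by one only on a
--     fingerprint hit. None if `expected` never occurs."""
--     if not expected:
--         return 0
--     plen = len(expected)
--     last = len(vals) - plen
--     if last < 0:
--         return None
--     MOD = (1 << 61) - 1
--     BASE = 1 << 33
--     target = 0
--     for v in expected:
--         target = (target * BASE + v) % MOD
--     h = 0
--     for v in vals[:plen]:
--         h = (h * BASE + v) % MOD
--     top = pow(BASE, plen - 1, MOD)
--     for i in range(last + 1):
--         if h == target and all(vals[i + k] == expected[k] for k in range(plen)):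
--             return i
--         if i < last:
--             h = ((h - vals[i] * top) * BASE + vals[i + plen]) % MOD
--     return None
--
--
-- def _ts_for_sequence(vals, ts, expected):
--     """Return list of ts corresponding to the first occurrence of `expected`
--     as a contiguous subsequence within (vals, ts). None if not found."""
--     start = _rk_find(vals, expected)
--     if start is None:
--         return None
--     return ts[start:start + len(expected)]
-- ===== Notes on version B (the rewrite author's own statement) =====
-- stated objective: alternative
-- what changed: Replaces A's per-position slice comparison by a Rabin-Karp scan: a rolling base-2^33 window fingerprint modulo the Mersenne prime 2^61-1, updated in O(1) per shift, with element-wise verification only when the fingerprint equals the pattern's.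
import Mathlib
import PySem

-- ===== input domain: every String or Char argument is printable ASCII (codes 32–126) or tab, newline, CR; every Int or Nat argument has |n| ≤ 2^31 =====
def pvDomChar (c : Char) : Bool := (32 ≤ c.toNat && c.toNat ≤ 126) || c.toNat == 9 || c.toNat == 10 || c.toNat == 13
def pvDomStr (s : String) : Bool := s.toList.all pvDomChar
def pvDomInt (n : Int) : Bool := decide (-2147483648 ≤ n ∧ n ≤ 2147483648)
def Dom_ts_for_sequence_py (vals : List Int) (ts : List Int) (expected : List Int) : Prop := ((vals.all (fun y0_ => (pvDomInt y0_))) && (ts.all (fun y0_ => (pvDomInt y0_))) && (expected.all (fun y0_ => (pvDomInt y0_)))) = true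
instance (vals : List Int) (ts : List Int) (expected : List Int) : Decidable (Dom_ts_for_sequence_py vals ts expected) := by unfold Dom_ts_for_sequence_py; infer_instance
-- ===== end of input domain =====

-- B replaces A's per-position slice comparison by a Rabin-Karp scan (alternative algorithm):
-- a rolling window fingerprint modulo 2^61-1, with element-wise verification only on a
-- fingerprint hit; proved equal on all inputs.

-- ===== PORT A =====
-- the 'for i in range(...)' loop with its early return
def tsAgo (vals ts expected : List Int) (m : Int) : List Int → Option (List Int)
  | [] => none
  | i :: rest =>
    if PySem.List.slice vals (some i) (some (i + m)) == expected then
      some (PySem.List.slice ts (some i) (some (i + m)))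
    else tsAgo vals ts expected m rest

def ts_for_sequence_py (vals : List Int) (ts : List Int) (expected : List Int) : Option (List Int) :=
  let n : Int := vals.length
  let m : Int := expected.length
  if m = 0 then some []
  else tsAgo vals ts expected m (PySem.List.pyRange 0 (n - m + 1) 1)

-- ===== PORT B =====
-- the target/h accumulation loops of Source B: h = (h * BASE + v) % MOD over a list
def rkHash (M B : Int) (l : List Int) : Int :=
  l.foldl (fun a v => PySem.Int.mod (a * B + v) M) 0

-- all(vals[i + k] == expected[k] for k in range(m))
def rkMatch (vals expected : List Int) (m i : Int) : Bool :=
  (PySem.List.pyRange 0 m 1).all fun k =>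
    PySem.List.pyGetD vals (i + k) 0 == PySem.List.pyGetD expected k 0

-- the main 'for i in range(last + 1)' loop of _rk_find, carrying the rolling fingerprint h
def rkLoop (vals expected : List Int) (plen last top B M target : Int) : Int → List Int → Option Int
  | _, [] => none
  | h, i :: rest =>
    if h == target && rkMatch vals expected plen i then
      some i
    else
      rkLoop vals expected plen last top B M target
        (if i < last then
          PySem.Int.mod ((h - PySem.List.pyGetD vals i 0 * top) * B + PySem.List.pyGetD vals (i + plen) 0) M
         else h)
        rest

-- _rk_find: index of the first occurrence, by Rabin-Karp
def rkFind (vals expected : List Int) : Option Int :=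
  if expected == [] then some 0
  else
    let plen : Int := expected.length
    let last : Int := (vals.length : Int) - plen
    if last < 0 then none
    else
      let M : Int := 2 ^ 61 - 1
      let B : Int := 2 ^ 33
      let target : Int := rkHash M B expected
      let h : Int := rkHash M B (PySem.List.slice vals none (some plen))
      let top : Int := PySem.Int.powMod B ((plen - 1).toNat) M
      rkLoop vals expected plen last top B M target h (PySem.List.pyRange 0 (last + 1) 1)

def ts_for_sequence_py_alt (vals : List Int) (ts : List Int) (expected : List Int) : Option (List Int) :=
  match rkFind vals expected with
  | none => none
  | some start => some (PySem.List.slice ts (some start) (some (start + expected.length)))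

-- ===== PRECONDITION & SPEC =====
def Spec_ts_for_sequence_py (vals : List Int) (ts : List Int) (expected : List Int) (out : Option (List Int)) : Prop := out = ts_for_sequence_py_alt vals ts expected
instance (vals : List Int) (ts : List Int) (expected : List Int) (out : Option (List Int)) : Decidable (Spec_ts_for_sequence_py vals ts expected out) := by unfold Spec_ts_for_sequence_py; infer_instance

-- ===== CLAIM (what is proved, stated in full; the proofs are below) =====
def Claim_equal_ts_for_sequence_py : Prop := ∀ (vals : List Int) (ts : List Int) (expected : List Int), Dom_ts_for_sequence_py vals ts expected → Spec_ts_for_sequence_py vals ts expected (ts_for_sequence_py vals ts expected)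

-- ===== LEMMAS AND PROOFS =====

-- the pure (un-modded) positional fingerprint, used only in the proofs
def pHash (B : Int) (l : List Int) : Int := l.foldl (fun a v => a * B + v) 0

theorem pHash_foldl_acc (B : Int) (w : List Int) (a : Int) :
    w.foldl (fun x v => x * B + v) a = a * B ^ w.length + pHash B w := by
  induction w generalizing a with
  | nil => simp [pHash]
  | cons v w ih =>
    simp only [List.foldl_cons, List.length_cons, pHash] at *
    rw [ih (a * B + v), ih (0 * B + v)]
    ring

theorem pHash_cons (B : Int) (a : Int) (w : List Int) :
    pHash B (a :: w) = a * B ^ w.length + pHash B w := by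
  simp only [pHash, List.foldl_cons, zero_mul, zero_add]
  exact pHash_foldl_acc B w a

theorem pHash_append_singleton (B : Int) (w : List Int) (x : Int) :
    pHash B (w ++ [x]) = pHash B w * B + x := by
  simp [pHash, List.foldl_append]

-- pure rolling update: sliding the window one position to the right
theorem pRoll (B : Int) (vals : List Int) (j m : Nat) (hm : 1 ≤ m)
    (hlt : j + m < vals.length) :
    (pHash B ((vals.drop j).take m) - vals.getD j 0 * B ^ (m - 1)) * B + vals.getD (j + m) 0
      = pHash B ((vals.drop (j + 1)).take m) := by
  have hj : j < vals.length := by omega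
  have hdrop : vals.drop j = vals[j] :: vals.drop (j + 1) := List.drop_eq_getElem_cons hj
  have hm' : m = (m - 1) + 1 := by omega
  have hwin : (vals.drop j).take m = vals[j] :: (vals.drop (j + 1)).take (m - 1) := by
    rw [hdrop]
    calc (vals[j] :: vals.drop (j + 1)).take m
        = (vals[j] :: vals.drop (j + 1)).take ((m - 1) + 1) := by rw [← hm']
      _ = vals[j] :: (vals.drop (j + 1)).take (m - 1) := List.take_succ_cons
  have hlen : ((vals.drop (j + 1)).take (m - 1)).length = m - 1 := by
    rw [List.length_take, List.length_drop]; omega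
  have hidx : (vals.drop (j + 1))[m - 1]? = some vals[j + m] := by
    rw [List.getElem?_drop]
    have h2 : j + 1 + (m - 1) = j + m := by omega
    rw [h2, List.getElem?_eq_getElem (by omega)]
  have hwin2 : (vals.drop (j + 1)).take m = (vals.drop (j + 1)).take (m - 1) ++ [vals[j + m]] := by
    conv_lhs => rw [hm']
    rw [List.take_add_one, hidx]
    rfl
  rw [hwin, hwin2, pHash_cons, pHash_append_singleton, hlen,
    List.getD_eq_getElem vals 0 hj, List.getD_eq_getElem vals 0 (by omega)]
  ring

-- accumulator form of the modular fold
theorem mod_foldl (M B : Int) (l : List Int) (a : Int) :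
    l.foldl (fun x v => (x * B + v) % M) (a % M) = (l.foldl (fun x v => x * B + v) a) % M := by
  induction l generalizing a with
  | nil => simp
  | cons v l ih =>
    simp only [List.foldl_cons]
    have hstep : (a % M * B + v) % M = (a * B + v) % M := by
      conv_lhs => rw [Int.add_emod, Int.mul_emod, Int.emod_emod_of_dvd a dvd_rfl]
      rw [← Int.mul_emod, ← Int.add_emod]
    rw [hstep]
    exact ih (a * B + v)

-- the port's modular fingerprint is the pure fingerprint reduced mod M
theorem rkHash_val (M B : Int) (hM : 0 < M) (l : List Int) :
    rkHash M B l = pHash B l % M := by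
  unfold rkHash pHash
  simp only [PySem.Int.mod_eq_emod_of_pos hM]
  have := mod_foldl M B l 0
  rwa [Int.zero_emod] at this

theorem emod_step_congr (M B a a' x : Int) (h : a % M = a' % M) :
    (a * B + x) % M = (a' * B + x) % M := by
  rw [Int.add_emod, Int.mul_emod, h, ← Int.mul_emod, ← Int.add_emod]

-- modular rolling update
theorem mRoll (M B : Int) (vals : List Int) (j m : Nat) (hm : 1 ≤ m)
    (hlt : j + m < vals.length) :
    ((pHash B ((vals.drop j).take m) % M - vals.getD j 0 * (B ^ (m - 1) % M)) * B
        + vals.getD (j + m) 0) % M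
      = pHash B ((vals.drop (j + 1)).take m) % M := by
  have hcong : (pHash B ((vals.drop j).take m) % M - vals.getD j 0 * (B ^ (m - 1) % M)) % M
      = (pHash B ((vals.drop j).take m) - vals.getD j 0 * B ^ (m - 1)) % M := by
    rw [Int.sub_emod, Int.emod_emod_of_dvd _ dvd_rfl, Int.mul_emod,
      Int.emod_emod_of_dvd _ dvd_rfl, ← Int.mul_emod, ← Int.sub_emod]
  rw [emod_step_congr M B _ _ _ hcong, pRoll B vals j m hm hlt]

-- the element-wise verification loop decides equality of the window with the pattern
theorem rkMatch_iff (vals expected : List Int) (i m : Nat)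
    (him : i + m ≤ vals.length) (hlen : expected.length = m) :
    rkMatch vals expected (m : Int) (i : Int) = true ↔ (vals.drop i).take m = expected := by
  have hwl : ((vals.drop i).take m).length = m := by
    rw [List.length_take, List.length_drop]; omega
  unfold rkMatch
  rw [PySem.List.pyRange_zero_nat m]
  simp only [List.all_eq_true, List.mem_map, List.mem_range]
  constructor
  · intro h
    apply List.ext_getElem (by rw [hwl, hlen])
    intro k hk1 hk2
    have hk : k < m := by rwa [hwl] at hk1
    have := h ((k : Nat) : Int) ⟨k, hk, rfl⟩
    have hcast : ((i : Int) + (k : Int)) = (((i + k : Nat)) : Int) := by push_cast; ring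
    rw [hcast, PySem.List.pyGetD_natCast, PySem.List.pyGetD_natCast, beq_iff_eq] at this
    rw [List.getElem_take, List.getElem_drop,
      show vals[i + k] = vals.getD (i + k) 0 from (List.getD_eq_getElem vals 0 (by omega)).symm,
      show expected[k] = expected.getD k 0 from (List.getD_eq_getElem expected 0 (by omega)).symm]
    exact this
  · intro h x hx
    obtain ⟨k, hk, rfl⟩ := hx
    have hcast : ((i : Int) + (k : Int)) = (((i + k : Nat)) : Int) := by push_cast; ring
    rw [hcast, PySem.List.pyGetD_natCast, PySem.List.pyGetD_natCast, beq_iff_eq]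
    have h1 : ((vals.drop i).take m)[k] = vals[i + k] := by
      rw [List.getElem_take, List.getElem_drop]
    have h2 : ((vals.drop i).take m)[k]'(by omega) = expected[k]'(by omega) := by
      simp only [h]
    rw [List.getD_eq_getElem vals 0 (by omega), List.getD_eq_getElem expected 0 (by omega),
      ← h1, h2]

-- main loop equivalence: with h the fingerprint of the current window, B's loop
-- returns exactly what A's early-return loop returns on the same index range
theorem rkLoop_eq_tsAgo (vals ts expected : List Int) (hm : 1 ≤ expected.length) :
    ∀ (len k : Nat), (k : Int) + len = (vals.length : Int) - expected.length + 1 →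
    (match rkLoop vals expected expected.length ((vals.length : Int) - expected.length)
        ((2 ^ 33 : Int) ^ (expected.length - 1) % (2 ^ 61 - 1)) (2 ^ 33) (2 ^ 61 - 1)
        (rkHash (2 ^ 61 - 1) (2 ^ 33) expected)
        (pHash (2 ^ 33) ((vals.drop k).take expected.length) % (2 ^ 61 - 1))
        (PySem.List.pyRange (k : Int) ((vals.length : Int) - expected.length + 1) 1) with
      | none => none
      | some i => some (PySem.List.slice ts (some i) (some (i + (expected.length : Int)))))
      = tsAgo vals ts expected expected.length
          (PySem.List.pyRange (k : Int) ((vals.length : Int) - expected.length + 1) 1) := by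
  have hM : (0 : Int) < 2 ^ 61 - 1 := by norm_num
  intro len
  induction len with
  | zero =>
    intro k hk
    rw [PySem.List.pyRange_one_eq_nil (by omega)]
    rfl
  | succ len ih =>
    intro k hk
    have hkm : k + expected.length ≤ vals.length := by omega
    rw [PySem.List.pyRange_one_cons (by omega)]
    have hslice : PySem.List.slice vals (some (k : Int)) (some ((k : Int) + expected.length))
        = (vals.drop k).take expected.length := by
      exact_mod_cast PySem.List.slice_natCast_add vals k expected.length
    by_cases hmatch : (vals.drop k).take expected.length = expected
    · -- window matches: fingerprint matches too, both return the ts slice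
      have hMt : rkMatch vals expected (expected.length : Int) (k : Int) = true :=
        (rkMatch_iff vals expected k expected.length hkm rfl).mpr hmatch
      have hHt : (pHash (2 ^ 33) expected % (2 ^ 61 - 1)
          == rkHash (2 ^ 61 - 1) (2 ^ 33) expected) = true := by
        rw [rkHash_val _ _ hM]
        exact beq_self_eq_true _
      simp only [rkLoop, tsAgo, hslice, hmatch, BEq.rfl, hMt, hHt, Bool.and_self, if_pos]
    · have hMf : rkMatch vals expected (expected.length : Int) (k : Int) = false := by
        rw [← Bool.not_eq_true, rkMatch_iff vals expected k expected.length hkm rfl]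
        exact hmatch
      have hSf : (PySem.List.slice vals (some (k : Int)) (some ((k : Int) + expected.length))
          == expected) = false := by
        rw [hslice]; exact beq_eq_false_iff_ne.mpr hmatch
      simp only [rkLoop, tsAgo, hMf, hSf, Bool.and_false, Bool.false_eq_true, if_false]
      by_cases hend : k + expected.length < vals.length
      · -- more window positions remain: roll the fingerprint and use the IH
        have hcond : ((k : Int) < (vals.length : Int) - expected.length) := by
          have : ((k : Int) + expected.length < (vals.length : Int)) := by exact_mod_cast hend
          omega
        rw [if_pos hcond]
        have hget1 : PySem.List.pyGetD vals (k : Int) 0 = vals.getD k 0 :=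
          PySem.List.pyGetD_natCast vals k 0
        have hget2 : PySem.List.pyGetD vals ((k : Int) + expected.length) 0
            = vals.getD (k + expected.length) 0 := by
          have : ((k : Int) + expected.length) = ((k + expected.length : Nat) : Int) := by
            push_cast; ring
          rw [this]; exact PySem.List.pyGetD_natCast vals _ 0
        rw [PySem.Int.mod_eq_emod_of_pos hM, hget1, hget2,
          mRoll (2 ^ 61 - 1) (2 ^ 33) vals k expected.length hm hend]
        have hk1 : ((k : Int) + 1) = ((k + 1 : Nat) : Int) := by push_cast; ring
        rw [hk1, ih (k + 1) (by push_cast; push_cast at hk; omega)]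
      · -- k was the last candidate: the remaining range is empty
        have hend' : (vals.length : Int) ≤ (k : Int) + expected.length := by
          exact_mod_cast Nat.le_of_not_lt hend
        rw [PySem.List.pyRange_one_eq_nil (by omega)]
        rfl

-- ===== VERDICT (by name: the statement is the Claim_ definition above) =====
theorem ts_for_sequence_py_spec : Claim_equal_ts_for_sequence_py := by
  intro vals ts expected _
  unfold Spec_ts_for_sequence_py ts_for_sequence_py ts_for_sequence_py_alt rkFind
  have hM : (0 : Int) < 2 ^ 61 - 1 := by norm_num
  by_cases hE : expected = []
  · simp [hE]
    rw [PySem.List.slice_to ts (le_refl (0 : Int))]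
    rfl
  · have hm : 1 ≤ expected.length := List.length_pos_iff.mpr hE
    have hE' : (expected == []) = false := beq_eq_false_iff_ne.mpr hE
    have hm0 : ¬ ((expected.length : Int) = 0) := by omega
    simp only [hE', hm0, Bool.false_eq_true, if_false]
    by_cases hnm : (vals.length : Int) - expected.length < 0
    · rw [if_pos hnm, PySem.List.pyRange_one_eq_nil (by omega)]
      rfl
    · rw [if_neg hnm]
      have htop : PySem.Int.powMod (2 ^ 33) (((expected.length : Int) - 1).toNat) (2 ^ 61 - 1)
          = (2 ^ 33 : Int) ^ (expected.length - 1) % (2 ^ 61 - 1) := by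
        unfold PySem.Int.powMod
        rw [PySem.Int.mod_eq_emod_of_pos hM]
        congr 2
        omega
      have hinit : rkHash (2 ^ 61 - 1) (2 ^ 33)
            (PySem.List.slice vals none (some (expected.length : Int)))
          = pHash (2 ^ 33) ((vals.drop 0).take expected.length) % (2 ^ 61 - 1) := by
        rw [PySem.List.slice_to_natCast vals expected.length, rkHash_val _ _ hM, List.drop_zero]
      have h0 : ((0 : Nat) : Int) = (0 : Int) := rfl
      rw [htop, hinit, ← h0]
      exact (rkLoop_eq_tsAgo vals ts expected hm
        ((vals.length : Int) - expected.length + 1).toNat 0 (by omega)).symm
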